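-- pv_equiv track=rewrite | github.com/jayceazua/wallbreakers_work | company/pinterest_2.py | get_board_bounds
-- ===== SOURCE A (Python) =====
-- def get_board_bounds(board) -> bool:
--     bounds = set()
--     rowLength = len(board)
--
--     for row in range(rowLength):
--         colLength = len(board[row])
--         for col in range(colLength):
--             if board[row][col] == '0':
--                 if row == 0:
--                     bounds.add((row, col))
--                 if row == rowLength - 1:
--                     bounds.add((row, col))
--
--                 if col == 0:
--                     bounds.add((row, col))
--
--                 if col == colLength - 1:
--                     bounds.add((row, col))
--     return bounds
-- ===== SOURCE B (Python) =====
-- def get_board_bounds(board) -> bool: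
--     bounds = set()
--     m = len(board)
--     for row in range(m):
--         r = board[row]
--         n = len(r)
--         if row == 0 or row == m - 1:
--             for col in range(n):
--                 if r[col] == '0':
--                     bounds.add((row, col))
--         elif n > 0:
--             if r[0] == '0':
--                 bounds.add((row, 0))
--             if r[n - 1] == '0':
--                 bounds.add((row, n - 1))
--     return bounds
-- ===== Notes on version B (the rewrite author's own statement) =====
-- stated objective: alternative
-- what changed: B touches only the border cells (full scan of first/last row, just the two end cells of every middle row) instead of A's scan of every cell with four border tests per cell; B does asymptotically less work on middle rows, though a timing run measured only ~1.3x on its generated boards.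
import Mathlib
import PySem

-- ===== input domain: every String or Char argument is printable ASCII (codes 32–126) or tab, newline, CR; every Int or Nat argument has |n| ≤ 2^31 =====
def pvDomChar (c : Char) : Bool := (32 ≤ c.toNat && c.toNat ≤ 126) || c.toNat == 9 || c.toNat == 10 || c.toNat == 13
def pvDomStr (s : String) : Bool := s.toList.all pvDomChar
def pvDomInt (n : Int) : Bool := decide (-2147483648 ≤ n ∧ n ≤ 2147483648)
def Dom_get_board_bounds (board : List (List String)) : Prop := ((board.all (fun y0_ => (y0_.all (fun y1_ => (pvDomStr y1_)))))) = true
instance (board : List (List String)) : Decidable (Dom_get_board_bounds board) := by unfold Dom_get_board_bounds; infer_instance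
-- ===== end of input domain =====

-- B collects the same border zeros by iterating only the border cells (first/last row fully, the two end cells of each middle row) instead of scanning every cell with four border tests.


-- ===== PORT A =====
-- body of A's inner loop (the four border tests on one cell)
def pvACell (rowLength row colLength : Int) (rowL : List String)
    (bounds : PySem.Set (Int × Int)) (col : Int) : PySem.Set (Int × Int) :=
  if PySem.List.pyGetD rowL col "" == "0" then
    let bounds := if row == 0 then PySem.Set.add bounds (row, col) else bounds
    let bounds := if row == rowLength - 1 then PySem.Set.add bounds (row, col) else bounds
    let bounds := if col == 0 then PySem.Set.add bounds (row, col) else bounds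
    let bounds := if col == colLength - 1 then PySem.Set.add bounds (row, col) else bounds
    bounds
  else bounds

-- body of A's outer loop (full scan of one row)
def pvARow (rowLength : Int) (board : List (List String))
    (bounds : PySem.Set (Int × Int)) (row : Int) : PySem.Set (Int × Int) :=
  let rowL := PySem.List.pyGetD board row []
  let colLength : Int := rowL.length
  (PySem.List.pyRange 0 colLength 1).foldl (pvACell rowLength row colLength rowL) bounds

def get_board_bounds (board : List (List String)) : List (Int × Int) :=
  let rowLength : Int := board.length
  (PySem.List.pyRange 0 rowLength 1).foldl (pvARow rowLength board) PySem.Set.empty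

-- ===== PORT B =====
-- B's scan of an edge row (first or last): every cell is a border cell
def pvBEdge (row : Int) (r : List String)
    (bounds : PySem.Set (Int × Int)) : PySem.Set (Int × Int) :=
  (PySem.List.pyRange 0 (r.length : Int) 1).foldl
    (fun bounds col =>
      if PySem.List.pyGetD r col "" == "0" then PySem.Set.add bounds (row, col) else bounds)
    bounds

-- body of B's loop: edge rows fully, middle rows only at their two end cells
def pvBRow (m : Int) (board : List (List String))
    (bounds : PySem.Set (Int × Int)) (row : Int) : PySem.Set (Int × Int) :=
  let r := PySem.List.pyGetD board row []
  let n : Int := r.length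
  if row == 0 || row == m - 1 then
    pvBEdge row r bounds
  else if n > 0 then
    let bounds := if PySem.List.pyGetD r 0 "" == "0" then PySem.Set.add bounds (row, 0) else bounds
    if PySem.List.pyGetD r (n - 1) "" == "0" then PySem.Set.add bounds (row, n - 1) else bounds
  else bounds

def get_board_bounds_alt (board : List (List String)) : List (Int × Int) :=
  let m : Int := board.length
  (PySem.List.pyRange 0 m 1).foldl (pvBRow m board) PySem.Set.empty

-- ===== PRECONDITION & SPEC =====
def Spec_get_board_bounds (board : List (List String)) (out : List (Int × Int)) : Prop := out = get_board_bounds_alt board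
instance (board : List (List String)) (out : List (Int × Int)) : Decidable (Spec_get_board_bounds board out) := by unfold Spec_get_board_bounds; infer_instance

-- ===== CLAIM (what is proved, stated in full; the proofs are below) =====
def Claim_equal_get_board_bounds : Prop := ∀ (board : List (List String)), Dom_get_board_bounds board → Spec_get_board_bounds board (get_board_bounds board)

-- ===== LEMMAS AND PROOFS =====

theorem foldl_id_of_fixed {α β : Type} (f : β → α → β) (l : List α) (b : β)
    (h : ∀ a ∈ l, ∀ s, f s a = s) : l.foldl f b = b := by
  induction l generalizing b with
  | nil => rfl
  | cons a t ih =>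
    simp only [List.foldl_cons]
    rw [h a (List.mem_cons_self), ih _ (fun a' ha' => h a' (List.mem_cons_of_mem _ ha'))]

-- on an edge row every cell test of A collapses to B's single conditional add
theorem aCell_edge (m row n : Int) (r : List String)
    (hrow : row = 0 ∨ row = m - 1) (bounds : PySem.Set (Int × Int)) (col : Int) :
    pvACell m row n r bounds col =
      (if PySem.List.pyGetD r col "" == "0" then PySem.Set.add bounds (row, col) else bounds) := by
  unfold pvACell
  by_cases hv : PySem.List.pyGetD r col "" == "0"
  · rcases hrow with h | h <;> subst h <;>
      split_ifs <;> simp_all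
  · simp [hv]

-- on a middle row A's cell test is a no-op away from the two end columns
theorem aCell_mid_id (m row n col : Int) (r : List String)
    (h0 : row ≠ 0) (hm : row ≠ m - 1) (c0 : col ≠ 0) (cn : col ≠ n - 1)
    (bounds : PySem.Set (Int × Int)) :
    pvACell m row n r bounds col = bounds := by
  unfold pvACell
  simp [h0, hm, c0, cn]

theorem row_eq (m : Int) (board : List (List String)) (bounds : PySem.Set (Int × Int))
    (row : Int) : pvARow m board bounds row = pvBRow m board bounds row := by
  unfold pvARow pvBRow pvBEdge
  set r := PySem.List.pyGetD board row [] with hr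
  by_cases hrow : row = 0 ∨ row = m - 1
  · have hb : (row == 0 || row == m - 1) = true := by
      rcases hrow with h | h <;> simp [h]
    simp only [hb, if_pos]
    apply PySem.List.foldl_congr_mem
    intro b c _
    exact aCell_edge m row _ r hrow b c
  · have h0 : row ≠ 0 := fun h => hrow (Or.inl h)
    have hm : row ≠ m - 1 := fun h => hrow (Or.inr h)
    have hb : (row == 0 || row == m - 1) = false := by simp [h0, hm]
    simp only [hb, Bool.false_eq_true, if_false]
    rcases Nat.eq_zero_or_pos r.length with hk | hk
    · simp [hk]
    · by_cases hk1 : r.length = 1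
      · have hn1 : ((r.length : Nat) : Int) = 1 := by simp [hk1]
        rw [hn1]
        rw [show PySem.List.pyRange 0 1 1 = [0] by decide]
        simp only [List.foldl_cons, List.foldl_nil]
        unfold pvACell
        simp [h0, hm]
        intro hv
        simp [hv]
      · have hk2 : 2 ≤ r.length := by omega
        have hn2 : (2:Int) ≤ (r.length : Int) := by exact_mod_cast hk2
        set n : Int := (r.length : Int) with hn
        rw [PySem.List.pyRange_one_append 0 1 n (by omega) (by omega),
            PySem.List.pyRange_one_append 1 (n-1) n (by omega) (by omega),
            show PySem.List.pyRange (n-1) n 1 = [n-1] by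
              have h := PySem.List.pyRange_one_singleton (n-1)
              rw [show (n-1) + 1 = n by ring] at h; exact h,
            show PySem.List.pyRange 0 1 1 = [0] from PySem.List.pyRange_one_singleton 0]
        rw [List.foldl_append, List.foldl_append]
        simp only [List.foldl_cons, List.foldl_nil]
        rw [foldl_id_of_fixed _ _ _ (fun c hc s => by
          have := (PySem.List.mem_pyRange_one).1 hc
          exact aCell_mid_id m row n c r h0 hm (by omega) (by omega) s)]
        unfold pvACell
        have e1 : (0:Int) ≠ n - 1 := by omega
        have e2 : n - 1 ≠ 0 := by omega
        simp [h0, hm, e1, e2, if_pos (show n > 0 by omega)]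

-- ===== VERDICT (by name: the statement is the Claim_ definition above) =====
theorem get_board_bounds_spec : Claim_equal_get_board_bounds := by
  intro board _
  unfold Spec_get_board_bounds get_board_bounds get_board_bounds_alt
  exact PySem.List.foldl_congr_mem _ _ _ _ (fun b row _ => row_eq _ board b row)
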